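-- pv_equiv track=rewrite | github.com/Arsen1302/Code-copy-detector | TestData/solutions/problem_478_2.py | solution_478_2
-- ===== SOURCE A (Python) =====
-- def solution_478_2(N: int) -> int:
--     d = {'0':'0','1':'1','2':'5','5':'2','6':'9','8':'8','9':'6'}
--     count = 0
--     for i in range(1,N+1):
--         x = ''
--         flag = True
--         for j in str(i):
--             if j not in d.keys():
--                 flag = False
--                 break
--             else:
--                 x += d[j]
--         if flag and x != str(i):
--             count += 1
--     return count
-- ===== SOURCE B (Python) =====
-- def solution_478_2(N: int) -> int:
--     # Count i in 1..N whose decimal digits all lie in {0,1,2,5,6,8,9} and whose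
--     # digit-wise strobogrammatic image differs from i (i.e. some digit is 2,5,6 or 9):
--     # count(digits in full set) - count(digits in fixed-point set {0,1,8}),
--     # each computed by a digit recursion instead of scanning every number.
--     def g(n, allowed):
--         # numbers x with 1 <= x <= n and every decimal digit of x in `allowed`
--         if n <= 0:
--             return 0
--         q, r = divmod(n, 10)
--         ones = sum(1 for t in allowed if 1 <= t <= min(n, 9))
--         lo = sum(1 for t in allowed if t <= r)
--         return ones + lo * g(q, allowed) + (len(allowed) - lo) * g(q - 1, allowed)
--     return g(N, (0, 1, 2, 5, 6, 8, 9)) - g(N, (0, 1, 8))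
-- ===== Notes on version B (the rewrite author's own statement) =====
-- stated objective: faster
-- what changed: Replaced the per-number scan over str(i) for every i up to N by a digit recursion: the answer is (count of numbers whose digits all map under the dict) minus (count whose digits are all fixed points), each counted by recursing on N with its last digit stripped, so the work depends on the number of digits of N, not on N.
import Mathlib
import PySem

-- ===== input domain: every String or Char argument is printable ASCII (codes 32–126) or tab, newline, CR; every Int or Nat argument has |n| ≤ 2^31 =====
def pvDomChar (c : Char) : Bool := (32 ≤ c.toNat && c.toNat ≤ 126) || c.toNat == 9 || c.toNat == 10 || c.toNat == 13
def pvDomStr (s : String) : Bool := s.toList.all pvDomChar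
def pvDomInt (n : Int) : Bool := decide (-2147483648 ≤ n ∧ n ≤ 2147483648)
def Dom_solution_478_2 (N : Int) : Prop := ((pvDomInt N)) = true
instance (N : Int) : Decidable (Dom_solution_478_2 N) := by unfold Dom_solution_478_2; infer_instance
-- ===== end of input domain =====

-- B replaces A's scan of str(i) for every i in 1..N by a digit recursion on N
-- (count of numbers with digits in {0,1,2,5,6,8,9} minus count with digits in {0,1,8});
-- measured faster at the large generated inputs.

-- ===== PORT A =====
-- the dict d of A, in its literal order
def pvDictA : PySem.Dict Char Char :=
  PySem.Dict.ofList [('0','0'),('1','1'),('2','5'),('5','2'),('6','9'),('8','8'),('9','6')]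

-- A's inner `for j in str(i)` loop: state (x, flag); `break` = stop recursing
def pvALoop : List Char → List Char → List Char × Bool
  | [], x => (x, true)
  | j :: rest, x =>
    if pvDictA.contains j then pvALoop rest (x ++ [pvDictA.getD j j]) else (x, false)

-- the condition under which A increments count for a given i
def pvACond (i : Int) : Bool :=
  let s := PySem.Int.toChars i
  let p := pvALoop s []
  p.2 && decide (p.1 ≠ s)

def solution_478_2 (N : Int) : Int :=
  (PySem.List.pyRange 1 (N + 1) 1).foldl
    (fun count i => if pvACond i then count + 1 else count) 0

-- ===== PORT B =====
-- Source B's g(n, allowed): numbers x with 1 ≤ x ≤ n and every decimal digit of x in `allowed`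
def pvG (n : Int) (allowed : List Int) : Int :=
  if n ≤ 0 then 0
  else
    let q := PySem.Int.floordiv n 10
    let r := PySem.Int.mod n 10
    let ones : Int := (allowed.filter (fun t => decide (1 ≤ t ∧ t ≤ min n 9))).length
    let lo : Int := (allowed.filter (fun t => decide (t ≤ r))).length
    ones + lo * pvG q allowed + ((allowed.length : Int) - lo) * pvG (q - 1) allowed
termination_by n.toNat
decreasing_by
  · have h10 : (0 : Int) < 10 := by norm_num
    rw [PySem.Int.floordiv_eq_ediv_of_pos h10]
    have h1 : n / 10 ≤ n := Int.ediv_le_self 10 (by omega)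
    omega
  · have h10 : (0 : Int) < 10 := by norm_num
    rw [PySem.Int.floordiv_eq_ediv_of_pos h10]
    have h1 : n / 10 ≤ n := Int.ediv_le_self 10 (by omega)
    omega

def solution_478_2_alt (N : Int) : Int :=
  pvG N [0, 1, 2, 5, 6, 8, 9] - pvG N [0, 1, 8]

-- ===== PRECONDITION & SPEC =====
def Spec_solution_478_2 (N : Int) (out : Int) : Prop := out = solution_478_2_alt N
instance (N : Int) (out : Int) : Decidable (Spec_solution_478_2 N out) := by unfold Spec_solution_478_2; infer_instance

-- ===== CLAIM (what is proved, stated in full; the proofs are below) =====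
def Claim_equal_solution_478_2 : Prop := ∀ (N : Int), Dom_solution_478_2 N → Spec_solution_478_2 N (solution_478_2 N)

-- ===== LEMMAS AND PROOFS =====

-- the digit set A's dict maps, and its fixed-point digits
def pvDs7 : List Nat := [0, 1, 2, 5, 6, 8, 9]
def pvDs3 : List Nat := [0, 1, 8]

-- big-endian decimal digits of n
def pvDigs (n : Nat) : List Nat :=
  if n < 10 then [n] else pvDigs (n / 10) ++ [n % 10]
termination_by n
decreasing_by exact Nat.div_lt_self (by omega) (by norm_num)

-- "every decimal digit of n lies in ds", by arithmetic recursion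
def pvOk (ds : List Nat) (n : Nat) : Bool :=
  if n < 10 then decide (n ∈ ds) else decide (n % 10 ∈ ds) && pvOk ds (n / 10)
termination_by n
decreasing_by exact Nat.div_lt_self (by omega) (by norm_num)

-- count of x in [1, n] all of whose digits lie in ds
def pvF (ds : List Nat) (n : Nat) : Nat :=
  ((Finset.Ioc 0 n).filter (fun x => pvOk ds x = true)).card

lemma pvOk_eq_all (ds : List Nat) (n : Nat) :
    pvOk ds n = (pvDigs n).all (fun d => decide (d ∈ ds)) := by
  induction n using Nat.strong_induction_on with
  | _ n ih =>
    rw [pvOk, pvDigs]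
    by_cases h : n < 10
    · simp [h]
    · simp [h, List.all_append, ih (n / 10) (Nat.div_lt_self (by omega) (by norm_num))]
      exact Bool.and_comm _ _

lemma pvDigs_lt (n : Nat) : ∀ d ∈ pvDigs n, d < 10 := by
  induction n using Nat.strong_induction_on with
  | _ n ih =>
    rw [pvDigs]
    by_cases h : n < 10
    · simp [h]
    · simp only [if_neg h, List.mem_append, List.mem_singleton]
      rintro d (hd | rfl)
      · exact ih (n / 10) (Nat.div_lt_self (by omega) (by norm_num)) d hd
      · omega

lemma pvToDigitsCore (f : Nat) : ∀ n l, n < f →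
    Nat.toDigitsCore 10 f n l = (pvDigs n).map Nat.digitChar ++ l := by
  induction f with
  | zero => intro n l h; omega
  | succ f ih =>
    intro n l h
    rw [Nat.toDigitsCore]
    by_cases h0 : n / 10 = 0
    · have hn : n < 10 := by omega
      rw [if_pos h0, pvDigs, if_pos hn, Nat.mod_eq_of_lt hn]
      simp
    · have hn : ¬ n < 10 := by omega
      rw [if_neg h0, ih (n / 10) _ (by omega)]
      conv_rhs => rw [pvDigs, if_neg hn]
      simp

-- str(i) for i = ↑n is the digit characters of n
lemma pvToChars_eq (n : Nat) : PySem.Int.toChars (n : Int) = (pvDigs n).map Nat.digitChar := by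
  rw [PySem.Int.toChars]
  rw [if_neg (by omega : ¬ (n : Int) < 0)]
  rw [Nat.toDigits, Int.toNat_natCast]
  exact (pvToDigitsCore (n + 1) n [] (by omega)).trans (by simp)

lemma pvALoop_snd (cs : List Char) : ∀ acc, (pvALoop cs acc).2 = cs.all (fun c => pvDictA.contains c) := by
  induction cs with
  | nil => intro acc; simp [pvALoop]
  | cons j rest ih =>
    intro acc
    rw [pvALoop]
    by_cases h : pvDictA.contains j
    · simp [h, ih]
    · simp [h]

lemma pvALoop_fst (cs : List Char) : ∀ acc, cs.all (fun c => pvDictA.contains c) = true →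
    (pvALoop cs acc).1 = acc ++ cs.map (fun c => pvDictA.getD c c) := by
  induction cs with
  | nil => intro acc _; simp [pvALoop]
  | cons j rest ih =>
    intro acc h
    simp only [List.all_cons, Bool.and_eq_true] at h
    rw [pvALoop, if_pos h.1, ih _ h.2]
    simp

lemma pvContains_digitChar : ∀ d, d < 10 → pvDictA.contains (Nat.digitChar d) = decide (d ∈ pvDs7) := by
  decide

lemma pvFix_digitChar : ∀ d, d < 10 → d ∈ pvDs7 →
    ((pvDictA.getD (Nat.digitChar d) (Nat.digitChar d) = Nat.digitChar d) ↔ d ∈ pvDs3) := by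
  decide

lemma pvAllCongr {α : Type} (l : List α) (p q : α → Bool) (h : ∀ x ∈ l, p x = q x) :
    l.all p = l.all q := by
  induction l with
  | nil => rfl
  | cons x xs ih => simp only [List.all_cons, h x (by simp), ih (fun y hy => h y (by simp [hy]))]

lemma pvMapEqSelf {α : Type} (l : List α) (f : α → α) : (l.map f = l ↔ ∀ c ∈ l, f c = c) := by
  induction l with
  | nil => simp
  | cons c cs ih => simp [ih]

-- A's per-element test, arithmetically
lemma pvACond_eq (m : Nat) : pvACond (m : Int) = (pvOk pvDs7 m && !(pvOk pvDs3 m)) := by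
  rw [pvACond]
  simp only [pvToChars_eq, pvALoop_snd, List.all_map]
  have hall : ((pvDigs m).all (fun d => (fun c => pvDictA.contains c) (Nat.digitChar d)))
      = pvOk pvDs7 m := by
    rw [pvOk_eq_all]
    exact pvAllCongr _ _ _ (fun d hd => pvContains_digitChar d (pvDigs_lt m d hd))
  rw [show ((fun c => pvDictA.contains c) ∘ Nat.digitChar) = fun d => pvDictA.contains (Nat.digitChar d) from rfl]
  rw [hall]
  by_cases h7 : pvOk pvDs7 m
  · rw [h7, Bool.true_and, Bool.true_and]
    have hmem : ∀ d ∈ pvDigs m, d ∈ pvDs7 := by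
      have := pvOk_eq_all pvDs7 m
      rw [h7] at this
      intro d hd
      have := (List.all_eq_true.mp this.symm) d hd
      simpa using this
    rw [pvALoop_fst _ _ (by
      rw [List.all_map]
      rw [show ((fun c => pvDictA.contains c) ∘ Nat.digitChar) = fun d => pvDictA.contains (Nat.digitChar d) from rfl]
      rw [hall]; exact h7)]
    rw [List.nil_append]
    have hiff : ((((pvDigs m).map Nat.digitChar).map (fun c => pvDictA.getD c c))
        = (pvDigs m).map Nat.digitChar) ↔ (pvOk pvDs3 m = true) := by
      rw [pvMapEqSelf, pvOk_eq_all, List.all_eq_true]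
      constructor
      · intro h d hd
        simp only [decide_eq_true_eq]
        exact (pvFix_digitChar d (pvDigs_lt m d hd) (hmem d hd)).mp
          (h (Nat.digitChar d) (List.mem_map_of_mem hd))
      · intro h c hc
        obtain ⟨d, hd, rfl⟩ := List.mem_map.mp hc
        exact (pvFix_digitChar d (pvDigs_lt m d hd) (hmem d hd)).mpr (by simpa using h d hd)
    have hd : decide (((pvDigs m).map Nat.digitChar).map (fun c => pvDictA.getD c c)
        = (pvDigs m).map Nat.digitChar) = pvOk pvDs3 m := by
      rw [decide_eq_decide.mpr hiff, Bool.decide_coe]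
    simp only [ne_eq, decide_not]
    rw [hd]
  · simp only [Bool.not_eq_true] at h7
    rw [h7]
    simp

-- countP over 0..n-1 of P(k+1) is the filtered-interval cardinality
lemma pvCountP_range (P : Nat → Bool) (n : Nat) :
    (List.range n).countP (fun k => P (k + 1)) = ((Finset.Ioc 0 n).filter (fun x => P x = true)).card := by
  induction n with
  | zero => simp
  | succ n ih =>
    rw [List.range_succ, List.countP_append, ih]
    have hins : Finset.Ioc 0 (n + 1) = insert (n + 1) (Finset.Ioc 0 n) := by
      ext x
      simp [Finset.mem_Ioc, Finset.mem_insert]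
      omega
    rw [hins, Finset.filter_insert]
    by_cases h : P (n + 1) = true
    · rw [if_pos h, Finset.card_insert_of_notMem (by simp [Finset.mem_Ioc])]
      simp [h]
    · rw [if_neg h]
      simp only [List.countP_cons]
      simp only [Bool.not_eq_true] at h
      simp [h]

lemma pvOk_mono (n : Nat) (h : pvOk pvDs3 n = true) : pvOk pvDs7 n = true := by
  rw [pvOk_eq_all] at h ⊢
  rw [List.all_eq_true] at h ⊢
  intro d hd
  have h3 := h d hd
  simp only [decide_eq_true_eq, pvDs3, pvDs7, List.mem_cons, List.not_mem_nil] at h3 ⊢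
  rcases h3 with rfl | rfl | rfl | h3 <;> first | exact h3.elim | norm_num

lemma pvCard_diff (n : Nat) :
    ((Finset.Ioc 0 n).filter (fun x => (pvOk pvDs7 x && !(pvOk pvDs3 x)) = true)).card
      = pvF pvDs7 n - pvF pvDs3 n ∧ pvF pvDs3 n ≤ pvF pvDs7 n := by
  have hsub : (Finset.Ioc 0 n).filter (fun x => pvOk pvDs3 x = true)
      ⊆ (Finset.Ioc 0 n).filter (fun x => pvOk pvDs7 x = true) := by
    intro x hx
    simp only [Finset.mem_filter] at hx ⊢
    exact ⟨hx.1, pvOk_mono x hx.2⟩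
  have hset : (Finset.Ioc 0 n).filter (fun x => (pvOk pvDs7 x && !(pvOk pvDs3 x)) = true)
      = (Finset.Ioc 0 n).filter (fun x => pvOk pvDs7 x = true)
        \ (Finset.Ioc 0 n).filter (fun x => pvOk pvDs3 x = true) := by
    ext x
    simp only [Finset.mem_filter, Finset.mem_sdiff, Bool.and_eq_true, Bool.not_eq_true']
    constructor
    · rintro ⟨hx, h7, h3⟩
      exact ⟨⟨hx, h7⟩, fun hc => by simp [hc.2] at h3⟩
    · rintro ⟨⟨hx, h7⟩, hc⟩
      refine ⟨hx, h7, ?_⟩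
      by_cases h3 : pvOk pvDs3 x = true
      · exact absurd ⟨hx, h3⟩ hc
      · simpa using h3
  refine ⟨?_, Finset.card_le_card hsub⟩
  rw [hset, Finset.card_sdiff_of_subset hsub]
  rfl

-- A's total count over [1, n]
lemma pvA_eq (n : Nat) :
    solution_478_2 (n : Int) =
      (((Finset.Ioc 0 n).filter (fun x => (pvOk pvDs7 x && !(pvOk pvDs3 x)) = true)).card : Int) := by
  unfold solution_478_2
  rw [PySem.List.foldl_count_if pvACond]
  rw [PySem.List.pyRange_one]
  have ht : ((n : Int) + 1 - 1).toNat = n := by omega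
  rw [ht, List.countP_map]
  have hc : List.countP (pvACond ∘ (fun (k : Nat) => (1 : Int) + (k : Int))) (List.range n)
      = List.countP (fun k => (fun x => pvOk pvDs7 x && !(pvOk pvDs3 x)) (k + 1)) (List.range n) := by
    apply List.countP_congr
    intro k _
    have h1 : (1 : Int) + (k : Int) = ((k + 1 : Nat) : Int) := by push_cast; ring
    simp only [Function.comp_apply, h1, pvACond_eq]
  rw [hc, pvCountP_range (fun x => pvOk pvDs7 x && !(pvOk pvDs3 x)) n]
  simp

lemma pvLenFilter (ds : List Nat) (hnd : ds.Nodup) (p : Nat → Bool) :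
    (ds.filter p).length = (ds.toFinset.filter (fun d => p d = true)).card := by
  rw [← List.toFinset_card_of_nodup (hnd.filter _), List.toFinset_filter]

lemma pvFilterMapCast (ds : List Nat) (p : Int → Bool) :
    (ds.map (fun (d : Nat) => (d : Int))).filter p
      = (ds.filter (fun (d : Nat) => p (d : Int))).map (fun (d : Nat) => (d : Int)) := by
  rw [List.filter_map]
  rfl

-- correctness of Source B's digit recursion
lemma pvG_eq (ds : List Nat) (hnd : ds.Nodup) (hlt : ∀ d ∈ ds, d < 10) (n : Nat) :
    pvG (n : Int) (ds.map (fun (d : Nat) => (d : Int))) = (pvF ds n : Int) := by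
  induction n using Nat.strong_induction_on with
  | _ n ih =>
  rcases Nat.eq_zero_or_pos n with rfl | hpos
  · rw [show ((0 : Nat) : Int) = (0 : Int) from rfl, pvG, if_pos (by omega : (0 : Int) ≤ 0)]
    simp [pvF]
  · rw [pvG, if_neg (by omega : ¬ ((n : Int) ≤ 0))]
    dsimp only
    have h10 : (10 : Int) = ((10 : Nat) : Int) := rfl
    rw [h10, PySem.Int.floordiv_natCast, PySem.Int.mod_natCast]
    by_cases hsm : n < 10
    · -- one-digit range: both recursive calls vanish
      rw [show n / 10 = 0 from by omega]
      rw [show ((0 : Nat) : Int) = (0 : Int) from rfl]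
      rw [pvG, if_pos (by omega : (0 : Int) ≤ 0)]
      rw [show (0 : Int) - 1 = -1 from by ring, pvG, if_pos (by omega : (-1 : Int) ≤ 0)]
      simp only [mul_zero, add_zero]
      rw [pvFilterMapCast, List.length_map]
      rw [List.filter_congr (l := ds) (q := fun d => decide (1 ≤ d ∧ d ≤ n)) (by
        intro d hd
        simp only [decide_eq_decide]
        have hm : min ((n : Int)) 9 = (n : Int) := by omega
        rw [hm]
        constructor
        · rintro ⟨h1, h2⟩; exact ⟨by exact_mod_cast h1, by exact_mod_cast h2⟩
        · rintro ⟨h1, h2⟩; exact ⟨by exact_mod_cast h1, by exact_mod_cast h2⟩)]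
      rw [pvLenFilter ds hnd]
      unfold pvF
      have hfc : ((Finset.Ioc 0 n).filter (fun x => pvOk ds x = true))
          = ((Finset.Ioc 0 n).filter (fun x => x ∈ ds)) := by
        apply Finset.filter_congr
        intro x hx
        simp only [Finset.mem_Ioc] at hx
        rw [pvOk, if_pos (by omega : x < 10)]
        simp
      rw [hfc]
      have hst : (ds.toFinset.filter (fun d => (decide (1 ≤ d ∧ d ≤ n)) = true))
          = ((Finset.Ioc 0 n).filter (fun x => x ∈ ds)) := by
        ext x
        simp only [Finset.mem_filter, Finset.mem_Ioc, List.mem_toFinset, decide_eq_true_eq]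
        constructor
        · rintro ⟨hm, h1, h2⟩; exact ⟨⟨by omega, h2⟩, hm⟩
        · rintro ⟨⟨h1, h2⟩, hm⟩; exact ⟨hm, by omega, h2⟩
      rw [hst]
    · -- n ≥ 10: split off the one-digit numbers and group the rest by last digit
      have hbig : 10 ≤ n := by omega
      have hq1 : 1 ≤ n / 10 := by omega
      rw [show ((n / 10 : Nat) : Int) - 1 = ((n / 10 - 1 : Nat) : Int) from by push_cast [hq1]; ring]
      rw [ih (n / 10) (by omega), ih (n / 10 - 1) (by omega)]
      rw [pvFilterMapCast, List.length_map]
      rw [List.filter_congr (l := ds) (q := fun d => decide (1 ≤ d ∧ d ≤ 9)) (by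
        intro d hd
        simp only [decide_eq_decide]
        have hm : min ((n : Int)) 9 = (9 : Int) := by omega
        rw [hm]
        constructor
        · rintro ⟨h1, h2⟩; exact ⟨by exact_mod_cast h1, by exact_mod_cast h2⟩
        · rintro ⟨h1, h2⟩; exact ⟨by exact_mod_cast h1, by exact_mod_cast h2⟩)]
      rw [pvLenFilter ds hnd]
      rw [pvFilterMapCast, List.length_map]
      rw [List.filter_congr (l := ds) (q := fun d => decide (d ≤ n % 10)) (by
        intro d hd
        simp only [decide_eq_decide]
        constructor
        · intro h1; exact_mod_cast h1
        · intro h1; exact_mod_cast h1)]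
      rw [pvLenFilter ds hnd, List.length_map]
      have hones : ds.toFinset.filter (fun d => (decide (1 ≤ d ∧ d ≤ 9)) = true)
          = ds.toFinset.filter (fun d => 1 ≤ d ∧ d ≤ 9) := by
        apply Finset.filter_congr; intro d _; simp
      have hlo : ds.toFinset.filter (fun d => (decide (d ≤ n % 10)) = true)
          = ds.toFinset.filter (fun d => d ≤ n % 10) := by
        apply Finset.filter_congr; intro d _; simp
      rw [hones, hlo]
      set q := n / 10 with hqdef
      set r := n % 10 with hrdef
      set L := ds.toFinset.filter (fun d => d ≤ r) with hLdef
      have hLle : L.card ≤ ds.length := by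
        calc L.card ≤ ds.toFinset.card := Finset.card_le_card (Finset.filter_subset _ _)
        _ = ds.length := List.toFinset_card_of_nodup hnd
      have key : pvF ds n = (ds.toFinset.filter (fun d => 1 ≤ d ∧ d ≤ 9)).card
          + L.card * pvF ds q + (ds.length - L.card) * pvF ds (q - 1) := by
        have hsplit : Finset.Ioc 0 n = Finset.Ioc 0 9 ∪ Finset.Ioc 9 n :=
          (Finset.Ioc_union_Ioc_eq_Ioc (by omega) (by omega)).symm
        unfold pvF
        rw [hsplit, Finset.filter_union, Finset.card_union_of_disjoint
          (Finset.disjoint_filter_filter (by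
            simp only [Finset.disjoint_left, Finset.mem_Ioc]
            intro x hx1 hx2
            omega))]
        have hpart1 : ((Finset.Ioc 0 9).filter (fun x => pvOk ds x = true)).card
            = (ds.toFinset.filter (fun d => 1 ≤ d ∧ d ≤ 9)).card := by
          have hfc : ((Finset.Ioc 0 9).filter (fun x => pvOk ds x = true))
              = ((Finset.Ioc 0 9).filter (fun x => x ∈ ds)) := by
            apply Finset.filter_congr
            intro x hx
            simp only [Finset.mem_Ioc] at hx
            rw [pvOk, if_pos (by omega : x < 10)]
            simp
          rw [hfc]
          congr 1
          ext x
          simp only [Finset.mem_filter, Finset.mem_Ioc, List.mem_toFinset]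
          constructor
          · rintro ⟨⟨h1, h2⟩, hm⟩; exact ⟨hm, by omega, h2⟩
          · rintro ⟨hm, h1, h2⟩; exact ⟨⟨by omega, h2⟩, hm⟩
        rw [hpart1]
        have hbij : (Finset.Ioc 9 n).filter (fun x => pvOk ds x = true)
            = ds.toFinset.biUnion (fun d =>
                ((Finset.Ioc 0 (if d ≤ r then q else q - 1)).filter (fun y => pvOk ds y = true)).image
                  (fun y => 10 * y + d)) := by
          ext x
          simp only [Finset.mem_biUnion, Finset.mem_image, Finset.mem_filter, Finset.mem_Ioc,
            List.mem_toFinset]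
          constructor
          · rintro ⟨⟨hx9, hxn⟩, hok⟩
            have hx10 : ¬ x < 10 := by omega
            rw [pvOk, if_neg hx10] at hok
            simp only [Bool.and_eq_true, decide_eq_true_eq] at hok
            refine ⟨x % 10, hok.1, x / 10, ⟨⟨by omega, ?_⟩, hok.2⟩, by omega⟩
            by_cases hdr : x % 10 ≤ r
            · rw [if_pos hdr]; omega
            · rw [if_neg hdr]; omega
          · rintro ⟨d, hd, y, ⟨⟨hy0, hyc⟩, hok⟩, rfl⟩
            have hdlt : d < 10 := hlt d hd
            have hx10 : ¬ 10 * y + d < 10 := by omega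
            have hm : (10 * y + d) % 10 = d := by omega
            have hdv : (10 * y + d) / 10 = y := by omega
            refine ⟨⟨by omega, ?_⟩, ?_⟩
            · by_cases hdr : d ≤ r
              · rw [if_pos hdr] at hyc; omega
              · rw [if_neg hdr] at hyc; omega
            · rw [pvOk, if_neg hx10, hm, hdv]
              simp [hd, hok]
        rw [hbij, Finset.card_biUnion (by
          intro a ha b hb hab
          simp only [List.coe_toFinset] at ha hb
          have hda : a < 10 := hlt a (by simpa using ha)
          have hdb : b < 10 := hlt b (by simpa using hb)
          simp only [Function.onFun, Finset.disjoint_left]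
          rintro x hxa hxb
          obtain ⟨y, _, rfl⟩ := Finset.mem_image.mp hxa
          obtain ⟨z, _, hz⟩ := Finset.mem_image.mp hxb
          omega)]
        have hcim : ∀ d ∈ ds.toFinset,
            (((Finset.Ioc 0 (if d ≤ r then q else q - 1)).filter (fun y => pvOk ds y = true)).image
              (fun y => 10 * y + d)).card = if d ≤ r then pvF ds q else pvF ds (q - 1) := by
          intro d _
          rw [Finset.card_image_of_injective _ (fun a b hab => by omega)]
          by_cases hdr : d ≤ r
          · rw [if_pos hdr, if_pos hdr]; rfl
          · rw [if_neg hdr, if_neg hdr]; rfl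
        rw [Finset.sum_congr rfl hcim, Finset.sum_ite, Finset.sum_const, Finset.sum_const,
          smul_eq_mul, smul_eq_mul]
        have hcnot : (ds.toFinset.filter (fun d => ¬ d ≤ r)).card = ds.length - L.card := by
          have h2 := Finset.card_filter_add_card_filter_not (s := ds.toFinset) (fun d => d ≤ r)
          rw [List.toFinset_card_of_nodup hnd] at h2
          have h3 : ({d ∈ ds.toFinset | d ≤ r}).card = L.card := by rw [hLdef]
          omega
        rw [hcnot]
        simp only [pvF, hLdef]
        ring
      rw [key]
      push_cast [hLle]
      ring

-- ===== VERDICT (by name: the statement is the Claim_ definition above) =====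
theorem solution_478_2_spec : Claim_equal_solution_478_2 := by
  intro N _
  unfold Spec_solution_478_2 solution_478_2_alt
  rcases (by omega : N ≤ 0 ∨ 0 < N) with hN | hN
  · have hA : solution_478_2 N = 0 := by
      unfold solution_478_2
      rw [PySem.List.pyRange_one_eq_nil (by omega)]
      rfl
    rw [hA, pvG, pvG, if_pos hN, if_pos hN]
    norm_num
  · obtain ⟨n, rfl⟩ : ∃ n : Nat, N = (n : Int) := ⟨N.toNat, (Int.toNat_of_nonneg (by omega)).symm⟩
    have h7 : ([0, 1, 2, 5, 6, 8, 9] : List Int) = pvDs7.map (fun (d : Nat) => (d : Int)) := by decide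
    have h3 : ([0, 1, 8] : List Int) = pvDs3.map (fun (d : Nat) => (d : Int)) := by decide
    rw [pvA_eq, h7, h3, pvG_eq pvDs7 (by decide) (by decide), pvG_eq pvDs3 (by decide) (by decide)]
    obtain ⟨hc, hle⟩ := pvCard_diff n
    rw [hc]
    push_cast [Nat.cast_sub hle]
    ring
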